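-- pv_equiv track=rewrite | github.com/amandari/incDFM_ECCV22 | src/datasets_utils.py | combine_for_replay_all
-- ===== SOURCE A (Python) =====
-- def combine_for_replay_all(list_paths):
--     combined_paths = []
--     num_tasks = len(list_paths)
--     for t in range(num_tasks):
--         combined_paths.append([])
--         for i, l in enumerate(list_paths):
--             if i<=t:
--                 combined_paths[-1].append(l)
--             else:
--                 break
--     return combined_paths
-- ===== SOURCE B (Python) =====
-- def combine_for_replay_all(list_paths):
--     combined_paths = []
--     cur = []
--     for l in list_paths:
--         cur = cur + [l]
--         combined_paths.append(cur)
--     return combined_paths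
-- ===== Notes on version B (the rewrite author's own statement) =====
-- stated objective: simpler
-- what changed: Single forward pass extending a running prefix (cur = cur + [l]) instead of A's nested loop that rebuilds every prefix from index 0 with an inner break.
import Mathlib
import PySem

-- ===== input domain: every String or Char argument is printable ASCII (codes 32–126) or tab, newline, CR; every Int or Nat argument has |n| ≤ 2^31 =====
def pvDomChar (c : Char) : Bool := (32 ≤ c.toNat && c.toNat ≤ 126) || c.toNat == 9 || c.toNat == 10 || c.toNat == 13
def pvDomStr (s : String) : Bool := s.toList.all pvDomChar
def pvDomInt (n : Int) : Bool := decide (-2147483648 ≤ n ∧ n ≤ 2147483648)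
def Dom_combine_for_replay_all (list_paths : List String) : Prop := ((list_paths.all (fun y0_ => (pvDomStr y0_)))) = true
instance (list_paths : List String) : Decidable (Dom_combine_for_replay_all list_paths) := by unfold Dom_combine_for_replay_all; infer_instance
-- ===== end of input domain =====

-- B builds each row by extending a running prefix in one forward pass, instead of
-- A's nested re-scan that rebuilds every prefix from index 0 with an inner break.

-- ===== PORT A =====
-- inner 'for i, l in enumerate(list_paths): if i<=t: row.append(l) else: break'
def pvInnerA (t : Int) : List (Int × String) → List String → List String
  | [], row => row
  | (i, l) :: rest, row => if i ≤ t then pvInnerA t rest (row ++ [l]) else row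

def combine_for_replay_all (list_paths : List String) : List (List String) :=
  (PySem.List.pyRange 0 (list_paths.length : Int) 1).foldl
    (fun combined t => combined ++ [pvInnerA t (PySem.List.enumerate list_paths 0) []]) []

-- ===== PORT B =====
def combine_for_replay_all_alt (list_paths : List String) : List (List String) :=
  (list_paths.foldl
    (fun (st : List String × List (List String)) l =>
      let cur := st.1 ++ [l]
      (cur, st.2 ++ [cur]))
    ([], [])).2

-- ===== PRECONDITION & SPEC =====
def Spec_combine_for_replay_all (list_paths : List String) (out : List (List String)) : Prop := out = combine_for_replay_all_alt list_paths
instance (list_paths : List String) (out : List (List String)) : Decidable (Spec_combine_for_replay_all list_paths out) := by unfold Spec_combine_for_replay_all; infer_instance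

-- ===== CLAIM (what is proved, stated in full; the proofs are below) =====
def Claim_equal_combine_for_replay_all : Prop := ∀ (list_paths : List String), Dom_combine_for_replay_all list_paths → Spec_combine_for_replay_all list_paths (combine_for_replay_all list_paths)

-- ===== LEMMAS AND PROOFS =====

-- A's inner loop appends exactly the first (t - s + 1) elements to the row.
theorem pvInnerA_enumerate (xs : List String) (t : Int) :
    ∀ (s : Int) (row : List String),
      pvInnerA t (PySem.List.enumerate xs s) row = row ++ xs.take (t - s + 1).toNat := by
  induction xs with
  | nil => intro s row; simp [PySem.List.enumerate_nil, pvInnerA]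
  | cons x xs ih =>
    intro s row
    rw [PySem.List.enumerate_cons]
    by_cases h : s ≤ t
    · have hn : (t - s + 1).toNat = (t - (s + 1) + 1).toNat + 1 := by omega
      simp only [pvInnerA, if_pos h, ih (s + 1)]
      simp [hn, List.take_succ_cons]
    · have hz : (t - s + 1).toNat = 0 := by omega
      simp [pvInnerA, if_neg h, hz]

theorem foldl_append_singleton {α β : Type} (f : α → β) :
    ∀ (l : List α) (init : List β),
      l.foldl (fun acc t => acc ++ [f t]) init = init ++ l.map f := by
  intro l
  induction l with
  | nil => simp
  | cons x xs ih => intro init; simp [List.foldl_cons, ih]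

theorem combine_A_eq (xs : List String) :
    combine_for_replay_all xs = (List.range xs.length).map (fun k => xs.take (k + 1)) := by
  unfold combine_for_replay_all
  rw [foldl_append_singleton]
  rw [PySem.List.pyRange_one]
  simp only [List.map_map]
  apply List.map_congr_left
  intro k _
  simp only [Function.comp]
  rw [pvInnerA_enumerate]
  have h : ((0 : Int) + (k : Int) - 0 + 1).toNat = k + 1 := by omega
  rw [h]
  simp

theorem combine_B_loop (xs : List String) :
    ∀ (cur : List String) (res : List (List String)),
      (xs.foldl
        (fun (st : List String × List (List String)) l =>
          let cur := st.1 ++ [l]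
          (cur, st.2 ++ [cur]))
        (cur, res)).2
      = res ++ (List.range xs.length).map (fun k => cur ++ xs.take (k + 1)) := by
  induction xs with
  | nil => intro cur res; simp
  | cons x xs ih =>
    intro cur res
    simp only [List.foldl_cons]
    rw [ih]
    rw [List.length_cons, List.range_succ_eq_map]
    simp [List.map_map, Function.comp, List.take_succ_cons, List.append_assoc]

theorem combine_B_eq (xs : List String) :
    combine_for_replay_all_alt xs = (List.range xs.length).map (fun k => xs.take (k + 1)) := by
  unfold combine_for_replay_all_alt
  rw [combine_B_loop]
  simp

-- ===== VERDICT (by name: the statement is the Claim_ definition above) =====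
theorem combine_for_replay_all_spec : Claim_equal_combine_for_replay_all := by
  intro xs _
  unfold Spec_combine_for_replay_all
  rw [combine_A_eq, combine_B_eq]
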